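-- pv_equiv track=rewrite | github.com/VictorGjn/agent-skills | context-engineering/eval/csb/diff_runs.py | pair_by_task
-- ===== SOURCE A (Python) =====
-- def pair_by_task(runs: list[list[dict]]) -> dict[str, list[dict | None]]:
--     """Index records by task_id across all runs. Missing tasks → None."""
--     all_ids: set[str] = set()
--     by_run: list[dict[str, dict]] = []
--     for r in runs:
--         idx = {rec["task_id"]: rec for rec in r if "task_id" in rec}
--         by_run.append(idx)
--         all_ids |= set(idx.keys())
--     return {tid: [idx.get(tid) for idx in by_run] for tid in sorted(all_ids)}
-- ===== SOURCE B (Python) =====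
-- def pair_by_task(runs: list[list[dict]]) -> dict[str, list[dict | None]]:
--     """Index records by task_id across all runs. Missing tasks → None."""
--     n = len(runs)
--     paired: dict[str, list[dict | None]] = {}
--     for i, r in enumerate(runs):
--         for rec in r:
--             if "task_id" in rec:
--                 tid = rec["task_id"]
--                 if tid not in paired:
--                     paired[tid] = [None] * n
--                 paired[tid][i] = rec
--     return {tid: paired[tid] for tid in sorted(paired)}
-- ===== Notes on version B (the rewrite author's own statement) =====
-- stated objective: alternative
-- what changed: Replaced the gather approach (per-run index dicts, a set of all ids, then a comprehension looking every id up in every index) by a single scatter pass: one dict of pre-filled [None]*len(runs) rows, filled in place at position i while enumerating the runs, then emitted in sorted key order.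
import Mathlib
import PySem

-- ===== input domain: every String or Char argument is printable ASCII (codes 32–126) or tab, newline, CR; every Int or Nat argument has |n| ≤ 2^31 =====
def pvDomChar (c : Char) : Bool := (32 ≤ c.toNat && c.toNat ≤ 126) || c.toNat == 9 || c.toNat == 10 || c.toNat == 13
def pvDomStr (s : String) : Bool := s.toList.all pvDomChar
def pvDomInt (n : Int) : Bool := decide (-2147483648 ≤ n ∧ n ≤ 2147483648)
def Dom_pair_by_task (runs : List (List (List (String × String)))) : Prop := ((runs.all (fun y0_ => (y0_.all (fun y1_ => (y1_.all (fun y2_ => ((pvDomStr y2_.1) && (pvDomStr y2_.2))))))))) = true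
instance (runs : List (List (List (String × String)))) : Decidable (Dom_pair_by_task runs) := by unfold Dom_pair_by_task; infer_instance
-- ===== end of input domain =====

-- B replaces A's per-run index dicts + gather comprehension by one scatter pass into
-- pre-filled [None]*len(runs) rows (alternative decomposition, same cost).


-- ===== PORT A =====
-- idx = {rec["task_id"]: rec for rec in r if "task_id" in rec}
def pvIdxA (r : List (List (String × String))) : PySem.Dict String (List (String × String)) :=
  r.foldl (fun idx rec =>
    match (PySem.Dict.mk rec).get? "task_id" with
    | some tid => idx.insert tid rec
    | none => idx) PySem.Dict.empty

def pair_by_task (runs : List (List (List (String × String)))) : List (String × List (Option (List (String × String)))) :=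
  let st := runs.foldl
    (fun (st : PySem.Set String × List (PySem.Dict String (List (String × String)))) r =>
      let idx := pvIdxA r
      (PySem.Set.union st.1 idx.keys, st.2 ++ [idx]))
    (PySem.Set.empty, [])
  (PySem.List.sorted st.1 (fun x => x) false).map
    (fun tid => (tid, st.2.map (fun idx => idx.get? tid)))

-- ===== PORT B =====
-- body of 'for rec in r': skip records without "task_id"; ensure a [None]*n row; row[i] = rec
def pvScatter (n : Nat) (i : Int)
    (p : PySem.Dict String (List (Option (List (String × String)))))
    (rec : List (String × String)) :
    PySem.Dict String (List (Option (List (String × String)))) :=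
  match (PySem.Dict.mk rec).get? "task_id" with
  | some tid =>
    let p := if p.contains tid then p else p.insert tid (List.replicate n none)
    p.insert tid (PySem.List.pySetD (p.getD tid []) i (some rec))
  | none => p

def pair_by_task_alt (runs : List (List (List (String × String)))) : List (String × List (Option (List (String × String)))) :=
  let n := runs.length
  let paired := (PySem.List.enumerate runs 0).foldl
    (fun p ir => ir.2.foldl (fun p rec => pvScatter n ir.1 p rec) p)
    PySem.Dict.empty
  (PySem.List.sorted paired.keys (fun x => x) false).map
    (fun tid => (tid, paired.getD tid []))

-- ===== PRECONDITION & SPEC =====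
def Spec_pair_by_task (runs : List (List (List (String × String)))) (out : List (String × List (Option (List (String × String))))) : Prop := out = pair_by_task_alt runs
instance (runs : List (List (List (String × String)))) (out : List (String × List (Option (List (String × String))))) : Decidable (Spec_pair_by_task runs out) := by unfold Spec_pair_by_task; infer_instance

-- ===== CLAIM (what is proved, stated in full; the proofs are below) =====
def Claim_equal_pair_by_task : Prop := ∀ (runs : List (List (List (String × String)))), Dom_pair_by_task runs → Spec_pair_by_task runs (pair_by_task runs)

-- ===== LEMMAS AND PROOFS =====

-- The value list of task tid, gathered A-style.
def pvRow (runs : List (List (List (String × String)))) (tid : String) : List (Option (List (String × String))) :=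
  runs.map (fun r => (pvIdxA r).get? tid)

-- A's inner step, named for reuse.
def pvStepA (idx : PySem.Dict String (List (String × String))) (rec : List (String × String)) :
    PySem.Dict String (List (String × String)) :=
  match (PySem.Dict.mk rec).get? "task_id" with
  | some tid => idx.insert tid rec
  | none => idx

theorem pvIdxA_eq_foldl (r : List (List (String × String))) :
    pvIdxA r = r.foldl pvStepA PySem.Dict.empty := rfl

-- ---- A-side accumulator characterisation ----
theorem pvA_fold_snd (rs : List (List (List (String × String))))
    (s : PySem.Set String) (ds : List (PySem.Dict String (List (String × String)))) :
    (rs.foldl (fun st r => (PySem.Set.union st.1 (pvIdxA r).keys, st.2 ++ [pvIdxA r])) (s, ds)).2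
      = ds ++ rs.map pvIdxA := by
  induction rs generalizing s ds with
  | nil => simp
  | cons r rs ih => simp [List.foldl_cons, ih]

theorem pvA_fold_fst_mem (rs : List (List (List (String × String))))
    (s : PySem.Set String) (ds : List (PySem.Dict String (List (String × String)))) (x : String) :
    x ∈ (rs.foldl (fun st r => (PySem.Set.union st.1 (pvIdxA r).keys, st.2 ++ [pvIdxA r])) (s, ds)).1
      ↔ x ∈ s ∨ ∃ r ∈ rs, x ∈ (pvIdxA r).keys := by
  induction rs generalizing s ds with
  | nil => simp
  | cons r rs ih =>
    simp [List.foldl_cons, ih, PySem.Set.mem_union]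
    tauto

theorem pvA_fold_fst_nodup (rs : List (List (List (String × String))))
    (s : PySem.Set String) (ds : List (PySem.Dict String (List (String × String))))
    (hs : s.Nodup) :
    (rs.foldl (fun st r => (PySem.Set.union st.1 (pvIdxA r).keys, st.2 ++ [pvIdxA r])) (s, ds)).1.Nodup := by
  induction rs generalizing s ds with
  | nil => simpa
  | cons r rs ih => exact ih _ _ (PySem.Set.nodup_union _ _ hs)

-- ---- B-side: one run, scattered at position i, relative to a base dict p0 ----
def pvRowOf (n : Nat) (p0 : PySem.Dict String (List (Option (List (String × String))))) (tid : String) :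
    List (Option (List (String × String))) :=
  (p0.get? tid).getD (List.replicate n none)

theorem pvScatter_run_aux (n : Nat) (k : Nat) (r : List (List (String × String)))
    (p0 : PySem.Dict String (List (Option (List (String × String)))))
    (p : PySem.Dict String (List (Option (List (String × String)))))
    (d : PySem.Dict String (List (String × String)))
    (H : ∀ tid, p.get? tid = match d.get? tid with
      | some rec => some ((pvRowOf n p0 tid).set k (some rec))
      | none => p0.get? tid)
    (tid : String) :
    (r.foldl (fun p rec => pvScatter n (k : Int) p rec) p).get? tid
      = match (r.foldl pvStepA d).get? tid with
        | some rec => some ((pvRowOf n p0 tid).set k (some rec))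
        | none => p0.get? tid := by
  induction r generalizing p d with
  | nil => exact H tid
  | cons rec r ih =>
    rw [List.foldl_cons, List.foldl_cons]
    cases hrec : (PySem.Dict.mk rec).get? "task_id" with
    | none =>
      have e1 : pvScatter n (k : Int) p rec = p := by unfold pvScatter; rw [hrec]
      have e2 : pvStepA d rec = d := by unfold pvStepA; rw [hrec]
      rw [e1, e2]; exact ih p d H
    | some tid' =>
      have e2 : pvStepA d rec = d.insert tid' rec := by unfold pvStepA; rw [hrec]
      rw [e2]
      apply ih
      intro t
      have hq : pvScatter n (k : Int) p rec
          = (if p.contains tid' then p else p.insert tid' (List.replicate n none)).insert tid'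
              (PySem.List.pySetD
                ((if p.contains tid' then p else p.insert tid' (List.replicate n none)).getD tid' [])
                (k : Int) (some rec)) := by
        unfold pvScatter; rw [hrec]
      rw [hq]
      by_cases ht : t = tid'
      · subst ht
        rw [PySem.Dict.get?_insert_self, PySem.Dict.get?_insert_self]
        simp only [PySem.List.pySetD_natCast]
        cases hd : d.get? t with
        | some rec0 =>
          have hp : p.get? t = some ((pvRowOf n p0 t).set k (some rec0)) := by
            have := H t; rw [hd] at this; exact this
          have hc : p.contains t = true := by
            rw [PySem.Dict.contains_eq_isSome_get?, hp]; rfl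
          rw [if_pos hc, PySem.Dict.getD_eq_get?_getD, hp]
          simp [List.set_set]
        | none =>
          have hp : p.get? t = p0.get? t := by
            have := H t; rw [hd] at this; exact this
          cases hp0 : p0.get? t with
          | some row0 =>
            have hc : p.contains t = true := by
              rw [PySem.Dict.contains_eq_isSome_get?, hp, hp0]; rfl
            rw [if_pos hc, PySem.Dict.getD_eq_get?_getD, hp, hp0]
            simp [pvRowOf, hp0]
          | none =>
            have hc : p.contains t = false := by
              rw [PySem.Dict.contains_eq_isSome_get?, hp, hp0]; rfl
            rw [if_neg (by simp [hc]), PySem.Dict.getD_eq_get?_getD,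
              PySem.Dict.get?_insert_self]
            simp [pvRowOf, hp0]
      · rw [PySem.Dict.get?_insert_of_ne _ _ ht, PySem.Dict.get?_insert_of_ne _ _ ht]
        have hq2 : (if p.contains tid' then p else p.insert tid' (List.replicate n none)).get? t
            = p.get? t := by
          split
          · rfl
          · exact PySem.Dict.get?_insert_of_ne _ _ ht
        rw [hq2]; exact H t

theorem pvScatter_run (n : Nat) (k : Nat) (r : List (List (String × String)))
    (p0 : PySem.Dict String (List (Option (List (String × String))))) (tid : String) :
    (r.foldl (fun p rec => pvScatter n (k : Int) p rec) p0).get? tid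
      = match (pvIdxA r).get? tid with
        | some rec => some ((pvRowOf n p0 tid).set k (some rec))
        | none => p0.get? tid := by
  rw [pvIdxA_eq_foldl]
  exact pvScatter_run_aux n k r p0 p0 PySem.Dict.empty
    (by intro tid; simp [PySem.Dict.get?_empty]) tid

-- ---- B-side: the whole enumerate fold, per key ----
theorem pvSetAppendCons {α : Type} (xs : List α) (y v : α) (t : List α) :
    (xs ++ y :: t).set xs.length v = xs ++ v :: t := by
  induction xs with
  | nil => rfl
  | cons a xs ih => simp [ih]

def pvApply (n : Nat) (tid : String) :
    List (List (List (String × String))) → Nat → Option (List (Option (List (String × String))))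
      → Option (List (Option (List (String × String))))
  | [], _, v => v
  | r :: rs, k, v =>
    pvApply n tid rs (k + 1)
      (match (pvIdxA r).get? tid with
       | some rec => some ((v.getD (List.replicate n none)).set k (some rec))
       | none => v)

theorem pvB_fold (n : Nat) (rs : List (List (List (String × String)))) (k : Nat)
    (p : PySem.Dict String (List (Option (List (String × String))))) (tid : String) :
    ((PySem.List.enumerate rs (k : Int)).foldl
        (fun p ir => ir.2.foldl (fun p rec => pvScatter n ir.1 p rec) p) p).get? tid
      = pvApply n tid rs k (p.get? tid) := by
  induction rs generalizing k p with
  | nil => simp [PySem.List.enumerate_nil, pvApply]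
  | cons r rs ih =>
    rw [PySem.List.enumerate_cons, List.foldl_cons]
    have hk1 : ((k : Int) + 1) = ((k + 1 : Nat) : Int) := by push_cast; ring
    rw [hk1, ih]
    show _ = pvApply n tid rs (k + 1) _
    congr 1
    rw [pvScatter_run]
    rfl

theorem pvApply_spec (n : Nat) (tid : String) (rs : List (List (List (String × String)))) (k : Nat)
    (xs : List (Option (List (String × String)))) (hx : xs.length = k) (hk : k + rs.length ≤ n) :
    pvApply n tid rs k
        (if xs.all (fun o => o.isNone) then none else some (xs ++ List.replicate (n - k) none))
      = (if (xs ++ pvRow rs tid).all (fun o => o.isNone) then none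
         else some ((xs ++ pvRow rs tid) ++ List.replicate (n - (k + rs.length)) none)) := by
  induction rs generalizing k xs with
  | nil => simp [pvApply, pvRow]
  | cons r rs ih =>
    have hkn : k < n := by simp at hk; omega
    have hrow : pvRow (r :: rs) tid = (pvIdxA r).get? tid :: pvRow rs tid := rfl
    have hrepl : List.replicate (n - k) (none : Option (List (String × String)))
        = none :: List.replicate (n - (k + 1)) none := by
      rw [← List.replicate_succ]
      congr 1
      omega
    have hk' : (k + 1) + rs.length ≤ n := by simp at hk ⊢; omega
    show pvApply n tid rs (k + 1) _ = _
    cases hg : (pvIdxA r).get? tid with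
    | none =>
      change pvApply n tid rs (k + 1)
        (if (xs.all fun o => o.isNone) = true then none
         else some (xs ++ List.replicate (n - k) none)) = _
      have hx' : (xs ++ [(none : Option (List (String × String)))]).length = k + 1 := by
        simp [hx]
      have this1 := ih (k + 1) (xs ++ [none]) hx' hk'
      have hall : (xs ++ [(none : Option (List (String × String)))]).all (fun o => o.isNone)
          = xs.all (fun o => o.isNone) := by simp
      rw [hall] at this1
      have hpad : xs ++ List.replicate (n - k) (none : Option (List (String × String)))
          = (xs ++ [none]) ++ List.replicate (n - (k + 1)) none := by
        rw [hrepl]; simp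
      rw [hpad, this1, hrow, hg]
      have h2 : (k + 1) + rs.length = k + (rs.length + 1) := by omega
      simp [h2, List.append_assoc]
    | some rec =>
      change pvApply n tid rs (k + 1)
        (some (((if (xs.all fun o => o.isNone) = true then none
                 else some (xs ++ List.replicate (n - k) none)).getD
            (List.replicate n none)).set k (some rec))) = _
      have hset : (xs ++ List.replicate (n - k) (none : Option (List (String × String)))).set k (some rec)
          = (xs ++ [some rec]) ++ List.replicate (n - (k + 1)) none := by
        rw [hrepl, ← hx, pvSetAppendCons]
        simp
      have hval : (((if (xs.all fun o => o.isNone) = true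
              then (none : Option (List (Option (List (String × String)))))
              else some (xs ++ List.replicate (n - k) none)).getD
            (List.replicate n none)).set k (some rec))
          = (xs ++ [some rec]) ++ List.replicate (n - (k + 1)) none := by
        split
        next hle =>
          have hxs : xs = List.replicate k (none : Option (List (String × String))) := by
            rw [List.eq_replicate_iff]
            refine ⟨hx, ?_⟩
            intro b hb
            have := List.all_eq_true.mp hle b hb
            simpa [Option.isNone_iff_eq_none] using this
          have hrn : List.replicate n (none : Option (List (String × String)))
              = xs ++ List.replicate (n - k) none := by
            rw [hxs, ← List.replicate_add]
            congr 1
            omega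
          simp only [Option.getD_none, hrn, hset]
        next => simp only [Option.getD_some, hset]
      have hx' : (xs ++ [some rec]).length = k + 1 := by simp [hx]
      have this1 := ih (k + 1) (xs ++ [some rec]) hx' hk'
      have hall' : (xs ++ [some rec]).all (fun o => o.isNone) = false := by simp
      rw [hall'] at this1
      simp only [Bool.false_eq_true, if_false] at this1
      rw [hval, this1, hrow, hg]
      have h2 : (k + 1) + rs.length = k + (rs.length + 1) := by omega
      simp [h2, List.append_assoc]

theorem pvPaired_get (runs : List (List (List (String × String)))) (tid : String) :
    ((PySem.List.enumerate runs 0).foldl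
        (fun p ir => ir.2.foldl (fun p rec => pvScatter runs.length ir.1 p rec) p)
        PySem.Dict.empty).get? tid
      = (if (pvRow runs tid).all (fun o => o.isNone) then none else some (pvRow runs tid)) := by
  have h := pvB_fold runs.length runs 0 PySem.Dict.empty tid
  have h2 := pvApply_spec runs.length tid runs 0 [] rfl (by simp)
  simp only [PySem.Dict.get?_empty] at h
  simp only [List.all_nil, List.nil_append, if_true, Nat.sub_zero, Nat.zero_add,
    Nat.sub_self, List.replicate_zero, List.append_nil] at h2
  exact h.trans h2

-- keys of B's dict stay Nodup
theorem pvScatter_nodup (n : Nat) (i : Int)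
    (p : PySem.Dict String (List (Option (List (String × String)))))
    (rec : List (String × String)) (h : p.keys.Nodup) :
    (pvScatter n i p rec).keys.Nodup := by
  unfold pvScatter
  cases (PySem.Dict.mk rec).get? "task_id" with
  | none => exact h
  | some tid =>
    simp only
    split <;> exact PySem.Dict.nodup_keys_insert _ _ _ (by first | exact h | exact PySem.Dict.nodup_keys_insert _ _ _ h)

theorem pvPaired_nodup (n : Nat) (rs : List (List (List (String × String)))) (k : Int)
    (p : PySem.Dict String (List (Option (List (String × String))))) (h : p.keys.Nodup) :
    ((PySem.List.enumerate rs k).foldl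
        (fun p ir => ir.2.foldl (fun p rec => pvScatter n ir.1 p rec) p) p).keys.Nodup := by
  induction rs generalizing k p with
  | nil => simpa [PySem.List.enumerate]
  | cons r rs ih =>
    rw [PySem.List.enumerate_cons, List.foldl_cons]
    apply ih
    clear ih
    induction r generalizing p with
    | nil => simpa
    | cons rec r ihr => exact ihr _ (pvScatter_nodup _ _ _ _ h)

-- ===== VERDICT (by name: the statement is the Claim_ definition above) =====
theorem pvRow_isSome (runs : List (List (List (String × String)))) (tid : String) :
    ((pvRow runs tid).all (fun o => o.isNone) = false)
      ↔ ∃ r ∈ runs, tid ∈ (pvIdxA r).keys := by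
  rw [← Bool.not_eq_true, List.all_eq_true]
  simp only [pvRow, List.mem_map]
  constructor
  · intro h
    push Not at h
    obtain ⟨o, ⟨r, hr, ho⟩, hno⟩ := h
    refine ⟨r, hr, ?_⟩
    by_contra hmem
    rw [← PySem.Dict.get?_eq_none_iff_not_mem_keys] at hmem
    rw [← ho] at hno
    simp [hmem] at hno
  · intro ⟨r, hr, hmem⟩ h
    have hn := h _ ⟨r, hr, rfl⟩
    rw [Option.isNone_iff_eq_none, PySem.Dict.get?_eq_none_iff_not_mem_keys] at hn
    exact hn hmem

theorem pair_by_task_spec : Claim_equal_pair_by_task := by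
  intro runs _
  unfold Spec_pair_by_task pair_by_task pair_by_task_alt
  dsimp only
  rw [pvA_fold_snd]
  have hSmem := pvA_fold_fst_mem runs PySem.Set.empty [] 
  have hSnodup := pvA_fold_fst_nodup runs PySem.Set.empty [] (by simp [PySem.Set.empty])
  have hPget := pvPaired_get runs
  have hPnodup := pvPaired_nodup runs.length runs 0 PySem.Dict.empty (by simp)
  set S := (runs.foldl
      (fun st r => (PySem.Set.union st.1 (pvIdxA r).keys, st.2 ++ [pvIdxA r]))
      (PySem.Set.empty, ([] : List (PySem.Dict String (List (String × String)))))).1 with hS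
  set P := (PySem.List.enumerate runs 0).foldl
      (fun p ir => ir.2.foldl (fun p rec => pvScatter runs.length ir.1 p rec) p)
      PySem.Dict.empty with hP
  have hmemiff : ∀ x, x ∈ S ↔ x ∈ P.keys := by
    intro x
    have h1 : x ∈ S ↔ ((pvRow runs x).all (fun o => o.isNone) = false) := by
      rw [hSmem x, pvRow_isSome]
      simp [PySem.Set.empty]
    have h2 : x ∈ P.keys ↔ ((pvRow runs x).all (fun o => o.isNone) = false) := by
      constructor
      · intro h
        by_contra hc
        rw [Bool.not_eq_false] at hc
        have hn : P.get? x = none := by rw [hPget x, if_pos hc]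
        rw [PySem.Dict.get?_eq_none_iff_not_mem_keys] at hn
        exact hn h
      · intro h
        by_contra hc
        have hn : P.get? x = none := (PySem.Dict.get?_eq_none_iff_not_mem_keys _ _).2 hc
        rw [hPget x] at hn
        simp [h] at hn
    rw [h1, h2]
  have hperm : S.Perm P.keys :=
    (List.perm_ext_iff_of_nodup hSnodup hPnodup).2 hmemiff
  rw [PySem.List.sorted_eq_sorted_of_perm S P.keys (fun x => x) (fun a b h => h) hperm]
  apply List.map_congr_left
  intro tid htid
  have hmem : tid ∈ P.keys := by
    rw [PySem.List.mem_sorted] at htid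
    exact htid
  have hsome : P.get? tid ≠ none := by
    intro hc
    exact ((PySem.Dict.get?_eq_none_iff_not_mem_keys _ _).1 hc) hmem
  rw [hPget tid] at hsome
  have hall : (pvRow runs tid).all (fun o => o.isNone) = false := by
    by_contra h
    rw [Bool.not_eq_false] at h
    rw [if_pos h] at hsome
    exact hsome rfl
  have hget : P.get? tid = some (pvRow runs tid) := by
    rw [hPget tid, hall]
    simp
  rw [PySem.Dict.getD_eq_get?_getD, hget]
  simp [pvRow]
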